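-- pv_equiv track=rewrite | github.com/Sid7on1/WATCH-DOG | enhanced_manager.py | should_group_files
-- ===== SOURCE A (Python) =====
-- def should_group_files(current_task, new_file):
--     """Determine if files should be grouped together based on AI/ML project logic"""
--     if not current_task:
--         return True
--
--     # Get file purposes
--     current_purposes = [f.get('purpose', '').lower() for f in current_task]
--     new_purpose = new_file.get('purpose', '').lower()
--
--     # Group related AI/ML components
--     related_groups = [
--         ["model", "architecture", "network"],
--         ["training", "optimizer", "loss"],
--         ["data", "loader", "preprocessing"],
--         ["evaluation", "metrics", "testing"],
--         ["retrieval", "vector", "embedding"],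
--         ["agent", "planning", "reasoning"],
--         ["deployment", "serving", "monitoring"]
--     ]
--
--     for group in related_groups:
--         current_in_group = any(any(term in purpose for term in group) for purpose in current_purposes)
--         new_in_group = any(term in new_purpose for term in group)
--
--         if current_in_group and new_in_group:
--             return True
--
--     return False
-- ===== SOURCE B (Python) =====
-- # Flat keyword -> bit table; purposes are folded into integer bitmasks, and the
-- # decision is a single early-exit scan over the current files testing a bitwise AND
-- # against the new file's precomputed mask (no per-group loop at decision time).
-- TERM_BITS = {
--     "model": 1, "architecture": 1, "network": 1,
--     "training": 2, "optimizer": 2, "loss": 2,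
--     "data": 4, "loader": 4, "preprocessing": 4,
--     "evaluation": 8, "metrics": 8, "testing": 8,
--     "retrieval": 16, "vector": 16, "embedding": 16,
--     "agent": 32, "planning": 32, "reasoning": 32,
--     "deployment": 64, "serving": 64, "monitoring": 64,
-- }
--
--
-- def _mask(purpose):
--     """Bitmask of the related-group bits whose keywords occur in the purpose."""
--     m = 0
--     for term, bit in TERM_BITS.items():
--         if term in purpose:
--             m |= bit
--     return m
--
--
-- def should_group_files(current_task, new_file):
--     if not current_task:
--         return True
--     new_mask = _mask(new_file.get('purpose', '').lower())
--     return any(_mask(f.get('purpose', '').lower()) & new_mask for f in current_task)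
-- ===== Notes on version B (the rewrite author's own statement) =====
-- stated objective: alternative
-- what changed: B replaces A's per-group fused any/any scan with a flat keyword->bit table: each purpose is folded into an integer bitmask, the new file's mask is computed once, and the answer is an early-exit scan over the current files testing a bitwise AND against it (loop over files, not over groups).
import Mathlib
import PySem

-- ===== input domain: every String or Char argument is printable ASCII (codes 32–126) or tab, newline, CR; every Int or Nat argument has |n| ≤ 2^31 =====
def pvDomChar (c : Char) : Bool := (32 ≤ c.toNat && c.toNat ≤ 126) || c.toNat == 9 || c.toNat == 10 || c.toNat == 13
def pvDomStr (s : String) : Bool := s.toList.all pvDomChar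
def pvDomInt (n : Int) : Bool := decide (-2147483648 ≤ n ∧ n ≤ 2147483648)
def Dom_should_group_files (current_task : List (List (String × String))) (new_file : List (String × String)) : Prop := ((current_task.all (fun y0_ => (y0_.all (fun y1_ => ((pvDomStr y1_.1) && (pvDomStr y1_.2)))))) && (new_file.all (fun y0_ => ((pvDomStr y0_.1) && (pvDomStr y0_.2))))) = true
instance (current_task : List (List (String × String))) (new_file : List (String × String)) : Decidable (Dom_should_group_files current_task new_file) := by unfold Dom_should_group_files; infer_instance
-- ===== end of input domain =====

-- B folds each purpose into an integer bitmask via a flat keyword->bit table and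
-- decides by a single early-exit scan over the current files testing a bitwise AND
-- against the new file's precomputed mask (objective: alternative; same substring tests).

-- ===== PORT A =====
def relatedGroupsA : List (List String) :=
  [["model", "architecture", "network"],
   ["training", "optimizer", "loss"],
   ["data", "loader", "preprocessing"],
   ["evaluation", "metrics", "testing"],
   ["retrieval", "vector", "embedding"],
   ["agent", "planning", "reasoning"],
   ["deployment", "serving", "monitoring"]]

def should_group_files (current_task : List (List (String × String))) (new_file : List (String × String)) : Bool :=
  if current_task = [] then true
  else
    let current_purposes := current_task.map (fun f => PySem.Str.lower (PySem.Dict.getD (PySem.Dict.mk f) "purpose" ""))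
    let new_purpose := PySem.Str.lower (PySem.Dict.getD (PySem.Dict.mk new_file) "purpose" "")
    -- the for-loop over groups with early 'return True' and final 'return False'
    relatedGroupsA.any (fun group =>
      (current_purposes.any (fun purpose => group.any (fun term => PySem.Str.isIn term purpose))) &&
      (group.any (fun term => PySem.Str.isIn term new_purpose)))

-- ===== PORT B =====
-- TERM_BITS dict iterated via .items(): association list in insertion order
def sgfTermBits : List (String × Int) :=
  [("model", 1), ("architecture", 1), ("network", 1),
   ("training", 2), ("optimizer", 2), ("loss", 2),
   ("data", 4), ("loader", 4), ("preprocessing", 4),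
   ("evaluation", 8), ("metrics", 8), ("testing", 8),
   ("retrieval", 16), ("vector", 16), ("embedding", 16),
   ("agent", 32), ("planning", 32), ("reasoning", 32),
   ("deployment", 64), ("serving", 64), ("monitoring", 64)]

-- _mask: m = 0; for term, bit in TERM_BITS.items(): if term in purpose: m |= bit
-- 'm |= bit' is ported by hand as Int.lor (exact: Python's int '|' on any ints)
def sgfMask (purpose : String) : Int :=
  sgfTermBits.foldl (fun m tb => if PySem.Str.isIn tb.1 purpose then Int.lor m tb.2 else m) 0

def should_group_files_alt (current_task : List (List (String × String))) (new_file : List (String × String)) : Bool :=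
  if current_task = [] then true
  else
    let new_mask := sgfMask (PySem.Str.lower (PySem.Dict.getD (PySem.Dict.mk new_file) "purpose" ""))
    -- any(...) over the files; a nonzero int is truthy
    current_task.any (fun f =>
      (Int.land (sgfMask (PySem.Str.lower (PySem.Dict.getD (PySem.Dict.mk f) "purpose" ""))) new_mask) != 0)

-- ===== PRECONDITION & SPEC =====
def Spec_should_group_files (current_task : List (List (String × String))) (new_file : List (String × String)) (out : Bool) : Prop := out = should_group_files_alt current_task new_file
instance (current_task : List (List (String × String))) (new_file : List (String × String)) (out : Bool) : Decidable (Spec_should_group_files current_task new_file out) := by unfold Spec_should_group_files; infer_instance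

-- ===== CLAIM (what is proved, stated in full; the proofs are below) =====
def Claim_equal_should_group_files : Prop := ∀ (current_task : List (List (String × String))) (new_file : List (String × String)), Dom_should_group_files current_task new_file → Spec_should_group_files current_task new_file (should_group_files current_task new_file)

-- ===== LEMMAS AND PROOFS =====

-- group-membership booleans of a purpose, one per related group
def sgfG (i : Fin 7) (p : String) : Bool :=
  (relatedGroupsA.get (Fin.cast (by decide) i)).any (fun term => PySem.Str.isIn term p)

-- the mask as a function of the seven group booleans
def sgfMaskBits (b : Fin 7 → Bool) : Int :=
  let m1 : Int := if b 0 then Int.lor 0 1 else 0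
  let m2 := if b 1 then Int.lor m1 2 else m1
  let m3 := if b 2 then Int.lor m2 4 else m2
  let m4 := if b 3 then Int.lor m3 8 else m3
  let m5 := if b 4 then Int.lor m4 16 else m4
  let m6 := if b 5 then Int.lor m5 32 else m5
  if b 6 then Int.lor m6 64 else m6

lemma int_lor_lor_self (m b : Int) : Int.lor (Int.lor m b) b = Int.lor m b := by
  cases m <;> cases b <;> simp only [Int.lor] <;> congr 1 <;>
    apply Nat.eq_of_testBit_eq <;> intro i <;>
    simp [Nat.testBit_ldiff] ; tauto

lemma sgf_triple (p t1 t2 t3 : String) (b m : Int) :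
    [(t1,b),(t2,b),(t3,b)].foldl (fun m tb => if PySem.Str.isIn tb.1 p then Int.lor m tb.2 else m) m
      = if (PySem.Str.isIn t1 p || (PySem.Str.isIn t2 p || PySem.Str.isIn t3 p)) then Int.lor m b else m := by
  simp only [List.foldl]
  cases PySem.Str.isIn t1 p <;> cases PySem.Str.isIn t2 p <;> cases PySem.Str.isIn t3 p <;>
    simp [int_lor_lor_self]

lemma sgfMask_eq (p : String) : sgfMask p = sgfMaskBits (fun i => sgfG i p) := by
  have h : sgfTermBits =
      [("model", (1:Int)), ("architecture", 1), ("network", 1)] ++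
      ([("training", 2), ("optimizer", 2), ("loss", 2)] ++
      ([("data", 4), ("loader", 4), ("preprocessing", 4)] ++
      ([("evaluation", 8), ("metrics", 8), ("testing", 8)] ++
      ([("retrieval", 16), ("vector", 16), ("embedding", 16)] ++
      ([("agent", 32), ("planning", 32), ("reasoning", 32)] ++
      [("deployment", 64), ("serving", 64), ("monitoring", 64)]))))) := by rfl
  simp only [sgfMask, h, List.foldl_append, sgf_triple, sgfMaskBits, sgfG, relatedGroupsA]
  simp [List.any]

set_option maxHeartbeats 4000000 in
set_option maxRecDepth 100000 in
lemma sgfMaskBits_and (b c : Fin 7 → Bool) :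
    ((Int.land (sgfMaskBits b) (sgfMaskBits c)) != 0) = true ↔ ∃ i, b i ∧ c i := by
  revert b c; decide

lemma sgf_any_iff_fin (f : List String → Bool) :
    relatedGroupsA.any f = true ↔ ∃ i : Fin 7, f (relatedGroupsA.get (Fin.cast (by decide) i)) := by
  constructor
  · intro h
    rw [List.any_eq_true] at h
    obtain ⟨g, hg, hfg⟩ := h
    simp only [relatedGroupsA, List.mem_cons, List.not_mem_nil, or_false] at hg
    rcases hg with rfl|rfl|rfl|rfl|rfl|rfl|rfl
    · exact ⟨0, hfg⟩
    · exact ⟨1, hfg⟩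
    · exact ⟨2, hfg⟩
    · exact ⟨3, hfg⟩
    · exact ⟨4, hfg⟩
    · exact ⟨5, hfg⟩
    · exact ⟨6, hfg⟩
  · rintro ⟨i, hi⟩
    rw [List.any_eq_true]
    exact ⟨_, List.get_mem _ _, hi⟩

-- ===== VERDICT (by name: the statement is the Claim_ definition above) =====
theorem should_group_files_spec : Claim_equal_should_group_files := by
  intro ct nf _
  unfold Spec_should_group_files should_group_files should_group_files_alt
  by_cases h : ct = []
  · simp [h]
  · simp only [h, if_false]
    rw [Bool.eq_iff_iff]
    rw [sgf_any_iff_fin, List.any_eq_true]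
    constructor
    · rintro ⟨i, hi⟩
      rw [Bool.and_eq_true, List.any_eq_true] at hi
      obtain ⟨⟨p, hp, hc⟩, hn⟩ := hi
      rw [List.mem_map] at hp
      obtain ⟨f, hf, rfl⟩ := hp
      refine ⟨f, hf, ?_⟩
      rw [sgfMask_eq, sgfMask_eq, sgfMaskBits_and]
      exact ⟨i, hc, hn⟩
    · rintro ⟨f, hf, hm⟩
      rw [sgfMask_eq, sgfMask_eq, sgfMaskBits_and] at hm
      obtain ⟨i, hcf, hn⟩ := hm
      refine ⟨i, ?_⟩
      rw [Bool.and_eq_true, List.any_eq_true]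
      exact ⟨⟨_, List.mem_map.mpr ⟨f, hf, rfl⟩, hcf⟩, hn⟩
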